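-- pv_equiv track=rewrite | github.com/Rosaa44/CryptanalyseVigenere | CodeCrypto/cryptanalyse_vigenere.py | clef_par_decalages
-- ===== SOURCE A (Python) =====
-- alphabet = "ABCDEFGHIJKLMNOPQRSTUVWXYZ"
--
-- def freq(txt):
--     """
--     Renvoie un tableau avec le nombre d'occurence de chaque lettre dans le texte txt
--     """
--     alphabet = "ABCDEFGHIJKLMNOPQRSTUVWXYZ"
--     Occurences = {}
--     L=[]
--
--     for e in txt:
--         if e not in Occurences:
--             Occurences[e]=0
--         Occurences[e]+=1
--
--     # Print the frequences
--     for c in alphabet: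
--         if c in Occurences:
--             L.append(Occurences[c])
--         else:
--             L.append(0.0)
--
--
--     return L
--
-- def lettre_freq_max(txt):
--     """
--     Renvoie l'indice dans l'alphabet de la lettre la plus fréquente d'un texte
--     """
--     L=freq(txt)
--     max=0
--     indice=-1
--     for e in range(len(L)):
--         if L[e]>max:
--             max=L[e]
--             indice=e
--
--     return indice #on commence à 0 donc on ajoute 1 pour avoir l'indice dans l'alphabet
--
-- def clef_par_decalages(cipher, key_length):
--     """
--     Déchiffre le texte cipher:
--     retourne une liste des décalages du chiffrement de Vigenère.
--     """
--     decalages=[0]*key_length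
--     taille=len(cipher)
--     for k in range(key_length):
--         lettre=lettre_freq_max(cipher[k:taille:key_length]) #colonne
--         lettre=(lettre-4)%26 #indice de e = 4
--         decalages[k]=lettre
--     return decalages
-- ===== SOURCE B (Python) =====
-- def clef_par_decalages(cipher, key_length):
--     """One pass over the whole cipher builds a (column, letter) -> count table,
--     then a per-column argmax over the 26 letter counts gives each shift."""
--     if key_length <= 0:  # guards i % key_length below; nothing to decode
--         return []
--     counts = {}
--     for i, ch in enumerate(cipher):
--         o = ord(ch)
--         if 65 <= o <= 90:
--             key = (i % key_length, o - 65)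
--             counts[key] = counts.get(key, 0) + 1
--     decalages = []
--     for k in range(key_length):
--         best, idx = 0, -1
--         for j in range(26):
--             c = counts.get((k, j), 0)
--             if c > best:
--                 best, idx = c, j
--         decalages.append((idx - 4) % 26)
--     return decalages
-- ===== Notes on version B (the rewrite author's own statement) =====
-- stated objective: alternative
-- what changed: A slices the cipher key_length times and rebuilds a per-character frequency dict for each column; B makes one pass over the whole cipher accumulating a (column, letter)->count dictionary keyed by i % key_length, then does a per-column argmax over the 26 letter counts.
import Mathlib
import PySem

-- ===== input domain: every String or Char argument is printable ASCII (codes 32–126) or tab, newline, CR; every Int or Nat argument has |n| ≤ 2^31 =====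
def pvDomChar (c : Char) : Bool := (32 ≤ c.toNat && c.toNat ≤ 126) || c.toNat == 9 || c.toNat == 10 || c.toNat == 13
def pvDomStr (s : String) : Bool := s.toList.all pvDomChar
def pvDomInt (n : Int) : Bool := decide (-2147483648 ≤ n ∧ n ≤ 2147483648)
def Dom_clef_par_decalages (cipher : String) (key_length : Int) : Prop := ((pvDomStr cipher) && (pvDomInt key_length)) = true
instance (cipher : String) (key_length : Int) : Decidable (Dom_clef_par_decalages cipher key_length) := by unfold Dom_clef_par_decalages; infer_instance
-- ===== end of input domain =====

-- B replaces A's key_length separate slice-and-frequency passes by ONE pass over the cipher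
-- into a (column, letter) -> count dictionary followed by a per-column argmax (objective: alternative).

-- ===== PORT A =====
-- freq: dict of occurrences of every char, then the 26 alphabet counts in order
-- (the Python appends the float 0.0 for an absent letter; it is only ever compared
--  numerically, so it is ported as the integer 0).
def pvFreq (txt : List Char) : List Int :=
  let occ : PySem.Dict Char Int := txt.foldl (fun d e =>
      let d := if d.contains e then d else d.insert e 0
      d.modify e 0 (· + 1)) PySem.Dict.empty   -- Occurences[e] += 1 (key present: modify is exact)
  ("ABCDEFGHIJKLMNOPQRSTUVWXYZ".toList).foldl (fun L c =>
      if occ.contains c then L ++ [occ.getD c 0] else L ++ [(0 : Int)]) []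
  -- Occurences[c] with c a present key is exactly getD c 0

def pvLettreFreqMax (txt : List Char) : Int :=
  let L := pvFreq txt
  let r := (PySem.List.pyRange 0 (L.length : Int) 1).foldl
    (fun (s : Int × Int) e =>
      if PySem.List.pyGetD L e 0 > s.1 then (PySem.List.pyGetD L e 0, e) else s) (0, -1)
  r.2   -- L[e] with e ∈ range(len(L)) is always in range: pyGetD is exact here

def clef_par_decalages (cipher : String) (key_length : Int) : List Int :=
  let taille := PySem.Str.len cipher
  let dec : List Int := List.replicate key_length.toNat 0   -- [0]*key_length
  (PySem.List.pyRange 0 key_length 1).foldl (fun dec k =>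
    -- cipher[k:taille:key_length]; inside the loop key_length ≥ 1 ≠ 0, so slice? is `some`
    let lettre := pvLettreFreqMax ((PySem.List.slice? cipher.toList (some k) (some taille) key_length).getD [])
    let lettre := PySem.Int.mod (lettre - 4) 26
    dec.set k.toNat lettre) dec

-- ===== PORT B =====
def clef_par_decalages_alt (cipher : String) (key_length : Int) : List Int :=
  if key_length ≤ 0 then []
  else
    let counts : PySem.Dict (Int × Int) Int :=
      (PySem.List.enumerate cipher.toList 0).foldl (fun d p =>
        let o : Int := (p.2.toNat : Int)
        if 65 ≤ o ∧ o ≤ 90 then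
          let key := (PySem.Int.mod p.1 key_length, o - 65)
          d.insert key (d.getD key 0 + 1)
        else d) PySem.Dict.empty
    (PySem.List.pyRange 0 key_length 1).foldl (fun dec k =>
      let s := (PySem.List.pyRange 0 26 1).foldl
        (fun (s : Int × Int) j =>
          let c := counts.getD (k, j) 0
          if c > s.1 then (c, j) else s) ((0 : Int), (-1 : Int))
      dec ++ [PySem.Int.mod (s.2 - 4) 26]) []

-- ===== PRECONDITION & SPEC =====
def Spec_clef_par_decalages (cipher : String) (key_length : Int) (out : List Int) : Prop := out = clef_par_decalages_alt cipher key_length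
instance (cipher : String) (key_length : Int) (out : List Int) : Decidable (Spec_clef_par_decalages cipher key_length out) := by unfold Spec_clef_par_decalages; infer_instance

-- ===== CLAIM (what is proved, stated in full; the proofs are below) =====
def Claim_equal_clef_par_decalages : Prop := ∀ (cipher : String) (key_length : Int), Dom_clef_par_decalages cipher key_length → Spec_clef_par_decalages cipher key_length (clef_par_decalages cipher key_length)

-- ===== LEMMAS AND PROOFS =====

def pvAlpha : List Char := "ABCDEFGHIJKLMNOPQRSTUVWXYZ".toList

-- reference count: occurrences of letter c in column kN (positions ≡ kN mod klN)
def pvColCnt (xs : List Char) (klN kN : Nat) (c : Char) : Nat :=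
  (List.range xs.length).countP (fun i => (xs.getD i ' ' == c) && (i % klN == kN))

lemma pvPyRange_nil {a b : Int} (h : b ≤ a) : PySem.List.pyRange a b 1 = [] := by
  simp [PySem.List.pyRange, Int.not_lt.mpr h]

-- A's occurrence dict reads back as List.count
lemma pvOcc_getD (txt : List Char) : ∀ (d : PySem.Dict Char Int) (v : Char),
    (txt.foldl (fun d e =>
      (if d.contains e then d else d.insert e 0).modify e 0 (· + 1)) d).getD v 0 = d.getD v 0 + txt.count v := by
  induction txt with
  | nil => intro d v; simp
  | cons e t ih =>
    intro d v
    simp only [List.foldl_cons]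
    rw [ih]
    have hstep : ((if d.contains e then d else d.insert e 0).modify e 0 (· + 1)).getD v 0
        = (if v = e then d.getD v 0 + 1 else d.getD v 0) := by
      rw [PySem.Dict.getD_modify]
      by_cases hv : v = e
      · subst hv
        rw [if_pos rfl, if_pos rfl]
        by_cases hc : d.contains v
        · rw [if_pos hc]
        · rw [if_neg hc, PySem.Dict.getD_insert, if_pos rfl,
              PySem.Dict.getD_of_not_contains d 0 (by simpa using hc)]
      · rw [if_neg hv, if_neg hv]
        by_cases hc : d.contains e
        · rw [if_pos hc]
        · rw [if_neg hc, PySem.Dict.getD_insert, if_neg hv]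
    rw [hstep, List.count_cons]
    by_cases hv : v = e
    · subst hv; simp; omega
    · simp [hv, Ne.symm hv]

lemma pvOcc_contains (txt : List Char) : ∀ (d : PySem.Dict Char Int) (v : Char),
    (txt.foldl (fun d e =>
      (if d.contains e then d else d.insert e 0).modify e 0 (· + 1)) d).contains v = (d.contains v || decide (v ∈ txt)) := by
  induction txt with
  | nil => intro d v; simp
  | cons e t ih =>
    intro d v
    simp only [List.foldl_cons]
    rw [ih]
    have hstep : ((if d.contains e then d else d.insert e 0).modify e 0 (· + 1)).contains v
        = (v == e || d.contains v) := by
      rw [PySem.Dict.contains_modify]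
      by_cases hc : d.contains e
      · rw [if_pos hc]
      · rw [if_neg hc, PySem.Dict.contains_insert]
        cases h : (v == e) <;> simp
    rw [hstep]
    by_cases hv : v = e <;> by_cases hm : v ∈ t <;> simp [hv, hm]

-- A's freq list is the 26 alphabet counts in order
lemma pvFoldl_if_append {α : Type} (P : α → Prop) [DecidablePred P] (f g : α → Int)
    (l : List α) (acc : List Int) :
    l.foldl (fun L c => if P c then L ++ [f c] else L ++ [g c]) acc
      = acc ++ l.map (fun c => if P c then f c else g c) := by
  rw [← PySem.List.foldl_append_singleton_eq_map]
  exact PySem.List.foldl_congr_mem _ _ _ _ (fun acc x _ => by split <;> rfl)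

lemma pvFreq_eq_map (txt : List Char) :
    pvFreq txt = pvAlpha.map (fun c => (txt.count c : Int)) := by
  unfold pvFreq
  rw [pvFoldl_if_append]
  simp only [List.nil_append]
  apply List.map_congr_left
  intro c _
  split
  next h =>
    rw [pvOcc_getD, PySem.Dict.getD_empty]
    ring
  next h =>
    rw [pvOcc_contains, PySem.Dict.contains_empty] at h
    simp only [Bool.false_or, decide_eq_true_eq] at h
    have hn : c ∉ txt := by simpa using h
    rw [List.count_eq_zero.mpr hn]
    simp

lemma pvSet_snoc : ∀ (l : List Int) (x v : Int), (l ++ [x]).set l.length v = l ++ [v] := by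
  intro l
  induction l with
  | nil => intro x v; rfl
  | cons a t ih => intro x v; simp [List.set_cons_succ, ih]

-- A's mutate-in-place loop over [0]*n is a map over the range
lemma pvFoldl_set (g : Int → Int) (nN : Nat) : ∀ (a : Nat) (dec : List Int), dec.length = nN →
    (PySem.List.pyRange (a : Int) (nN : Int) 1).foldl (fun d k => d.set k.toNat (g k)) dec
      = dec.take a ++ (PySem.List.pyRange (a : Int) (nN : Int) 1).map g := by
  intro a
  induction hfuel : nN - a using Nat.strong_induction_on generalizing a with
  | _ fuel ih =>
    intro dec hlen
    by_cases han : a < nN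
    · have hcons : PySem.List.pyRange (a : Int) (nN : Int) 1 = (a : Int) :: PySem.List.pyRange ((a : Int) + 1) (nN : Int) 1 :=
        PySem.List.pyRange_one_cons (by exact_mod_cast han)
      rw [hcons]
      simp only [List.foldl_cons, List.map_cons]
      have hcast : ((a : Int) + 1) = ((a + 1 : Nat) : Int) := by push_cast; ring
      have hrec := ih (nN - (a + 1)) (by omega) (a + 1) rfl
        (dec.set ((a : Int)).toNat (g (a : Int))) (by rw [List.length_set]; exact hlen)
      rw [hcast, hrec]
      have htk : (dec.set ((a : Int)).toNat (g (a : Int))).take (a + 1)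
          = dec.take a ++ [g (a : Int)] := by
        rw [Int.toNat_natCast, List.take_set, List.take_add_one,
            List.getElem?_eq_getElem (by omega : a < dec.length)]
        have := pvSet_snoc (dec.take a) (dec[a]) (g (a : Int))
        rw [List.length_take] at this
        rw [show min a dec.length = a from by omega] at this
        exact this
      rw [htk]
      simp
    · rw [pvPyRange_nil (by exact_mod_cast Nat.le_of_not_lt han)]
      simp [List.take_of_length_le (by omega : dec.length ≤ a)]

-- the positions of column kN, in order
lemma pvRange_filter_mod (klN kN : Nat) (h1 : 0 < klN) (h2 : kN < klN) : ∀ (n : Nat),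
    (List.range n).filter (fun i => i % klN == kN)
      = (List.range ((n - kN + klN - 1) / klN)).map (fun m => kN + klN * m) := by
  intro n
  induction n with
  | zero => simp [Nat.div_eq_of_lt (by omega : klN - 1 < klN)]
  | succ n ih =>
    rw [List.range_succ, List.filter_append, ih]
    have hqr : klN * (n / klN) + n % klN = n := Nat.div_add_mod n klN
    set q := n / klN with hq
    set r := n % klN with hrdef
    have hr : r < klN := Nat.mod_lt _ h1
    by_cases hcase : r = kN
    · have hkn : kN ≤ n := by omega
      have hc1 : n - kN + klN - 1 = klN * q + (klN - 1) := by omega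
      have hc2 : n + 1 - kN + klN - 1 = klN * q + klN := by omega
      rw [hc1, hc2, Nat.mul_add_div h1, Nat.mul_add_div h1,
          Nat.div_eq_of_lt (by omega : klN - 1 < klN), Nat.div_self h1]
      simp only [List.filter_cons, List.filter_nil]
      rw [if_pos (by simp [← hrdef, hcase])]
      rw [List.range_succ, List.map_append]
      simp
      omega
    · simp only [List.filter_cons, List.filter_nil]
      rw [if_neg (by simp [← hrdef, hcase])]
      by_cases hkn : kN ≤ n
      · have hb := Nat.div_add_mod (n - kN) klN
        set a := (n - kN) / klN with ha
        set b := (n - kN) % klN with hbdef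
        have hblt : b < klN := Nat.mod_lt _ h1
        have hbne : b ≠ 0 := by
          intro h0
          apply hcase
          have hnk : n = klN * a + kN := by omega
          have : n % klN = kN % klN := by rw [hnk, Nat.mul_add_mod]
          rw [Nat.mod_eq_of_lt h2] at this
          omega
        have hc1 : n - kN + klN - 1 = klN * a + (b + klN - 1) := by omega
        have hc2 : n + 1 - kN + klN - 1 = klN * a + (b + klN) := by omega
        rw [hc1, hc2, Nat.mul_add_div h1, Nat.mul_add_div h1,
            Nat.div_eq_of_lt_le (by omega : 1 * klN ≤ b + klN - 1) (by omega : b + klN - 1 < (1 + 1) * klN),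
            Nat.div_eq_of_lt_le (by omega : 1 * klN ≤ b + klN) (by omega : b + klN < (1 + 1) * klN)]
        simp
      · have hc : n - kN + klN - 1 = n + 1 - kN + klN - 1 := by omega
        rw [hc]
        simp

lemma pvFilterMap_get (xs : List Char) : ∀ (l : List Nat), (∀ i ∈ l, i < xs.length) →
    l.filterMap (fun i => xs[i]?) = l.map (fun i => xs.getD i ' ') := by
  intro l
  induction l with
  | nil => intro _; simp
  | cons i t ih =>
    intro h
    have hi : i < xs.length := h i (by simp)
    simp only [List.filterMap_cons, List.map_cons]
    rw [List.getElem?_eq_getElem hi]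
    rw [ih (fun j hj => h j (by simp [hj])), List.getD_eq_getElem _ _ hi]

-- the column slice A takes has exactly the reference counts
lemma pvSlice_count (xs : List Char) (klN kN : Nat) (h1 : 0 < klN) (h2 : kN < klN) (c : Char) :
    ((PySem.List.slice? xs (some (kN : Int)) (some (xs.length : Int)) (klN : Int)).getD []).count c
      = pvColCnt xs klN kN c := by
  have hklne : ((klN : Int)) ≠ 0 := by exact_mod_cast h1.ne'
  have hklpos : (0 : Int) < (klN : Int) := by exact_mod_cast h1
  have hknn : ¬((kN : Int) < 0) := by omega
  by_cases hkn : kN < xs.length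
  · have hminle : ((kN : Int)) ≤ ((xs.length : Int)) := by exact_mod_cast Nat.le_of_lt hkn
    have hmin : min ((kN : Int)) ((xs.length : Int)) = (kN : Int) := min_eq_left hminle
    have hlt : ((kN : Int)) < ((xs.length : Int)) := by exact_mod_cast hkn
    have hcastcnt : (((xs.length : Int) - (kN : Int) + (klN : Int) - 1) / (klN : Int)).toNat
        = (xs.length - kN + klN - 1) / klN := by
      have hnum : ((xs.length : Int) - (kN : Int) + (klN : Int) - 1)
          = ((xs.length - kN + klN - 1 : Nat) : Int) := by omega
      rw [hnum]
      norm_cast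
    have hred : (PySem.List.slice? xs (some (kN : Int)) (some (xs.length : Int)) (klN : Int)).getD []
        = List.filterMap (fun (m : Nat) => xs[((kN : Int) + (klN : Int) * (m : Int)).toNat]?)
            (List.range ((xs.length - kN + klN - 1) / klN)) := by
      simp only [PySem.List.slice?, PySem.List.sliceIndices]
      rw [if_neg hklne]
      simp only [if_neg (by omega : ¬((klN : Int) < 0)), if_neg hknn,
        if_neg (by omega : ¬((xs.length : Int) < 0)), hmin, min_self,
        if_pos hklpos, if_pos hlt, hcastcnt, Option.getD_some]
    rw [hred]
    have hfun : (fun m : Nat => xs[((kN : Int) + (klN : Int) * (m : Int)).toNat]?)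
        = ((fun i : Nat => xs[i]?) ∘ (fun m : Nat => kN + klN * m)) := by
      funext m
      have : ((kN : Int) + (klN : Int) * (m : Int)).toNat = kN + klN * m := by
        have : ((kN : Int) + (klN : Int) * (m : Int)) = ((kN + klN * m : Nat) : Int) := by push_cast; ring
        rw [this, Int.toNat_natCast]
      rw [this]
      rfl
    rw [hfun, ← List.filterMap_map, ← pvRange_filter_mod klN kN h1 h2,
        pvFilterMap_get xs _ (fun i hi => List.mem_range.mp (List.mem_filter.mp hi).1),
        List.count_eq_countP, List.countP_map, List.countP_filter]
    rfl
  · have hminge : ((xs.length : Int)) ≤ ((kN : Int)) := by exact_mod_cast Nat.le_of_not_lt hkn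
    have hmin : min ((kN : Int)) ((xs.length : Int)) = ((xs.length : Int)) := min_eq_right hminge
    have hred : (PySem.List.slice? xs (some (kN : Int)) (some (xs.length : Int)) (klN : Int)).getD []
        = ([] : List Char) := by
      simp only [PySem.List.slice?, PySem.List.sliceIndices]
      rw [if_neg hklne]
      simp only [if_neg (by omega : ¬((klN : Int) < 0)), if_neg hknn,
        if_neg (by omega : ¬((xs.length : Int) < 0)), hmin, min_self,
        if_pos hklpos, if_neg (by omega : ¬((xs.length : Int) < (xs.length : Int)))]
      simp
    rw [hred]
    have : pvColCnt xs klN kN c = 0 := by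
      apply List.countP_eq_zero.mpr
      intro i hi
      have hilt : i < xs.length := List.mem_range.mp hi
      have : i % klN = i := Nat.mod_eq_of_lt (by omega)
      simp only [Bool.and_eq_true, beq_iff_eq]
      intro h
      omega
    rw [this]
    rfl

lemma pvAlpha_length : pvAlpha.length = 26 := by rfl

lemma pvAlpha_toNat : ∀ jn, jn < 26 → (pvAlpha.getD jn 'A').toNat = 65 + jn := by decide

lemma pvChar_eq_alpha (ch : Char) (jn : Nat) (hj : jn < 26) :
    ch = pvAlpha.getD jn 'A' ↔ ch.toNat = 65 + jn := by
  have h1 := pvAlpha_toNat jn hj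
  constructor
  · intro he
    exact he ▸ h1
  · intro h
    conv_lhs => rw [← Char.ofNat_toNat ch]
    rw [h, ← h1, Char.ofNat_toNat]

-- B's dictionary reads back as the reference counts
def pvF (xs : List Char) (klN : Nat) (i : Nat) : Option (Int × Int) :=
  if 65 ≤ (((xs.getD i ' ').toNat : Int)) ∧ (((xs.getD i ' ').toNat : Int)) ≤ 90 then
    some (PySem.Int.mod (i : Int) (klN : Int), ((xs.getD i ' ').toNat : Int) - 65)
  else none

lemma pvFoldF (xs : List Char) (klN : Nat) : ∀ (l : List Nat) (d : PySem.Dict (Int × Int) Int),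
    l.foldl (fun d i =>
        if 65 ≤ (((xs.getD i ' ').toNat : Int)) ∧ (((xs.getD i ' ').toNat : Int)) ≤ 90 then
          d.insert (PySem.Int.mod (i : Int) (klN : Int), ((xs.getD i ' ').toNat : Int) - 65)
            (d.getD (PySem.Int.mod (i : Int) (klN : Int), ((xs.getD i ' ').toNat : Int) - 65) 0 + 1)
        else d) d
      = (l.filterMap (fun i => pvF xs klN i)).foldl (fun d b => d.insert b (d.getD b 0 + 1)) d := by
  intro l
  induction l with
  | nil => intro d; rfl
  | cons i t ih =>
    intro d
    by_cases h : 65 ≤ (((xs.getD i ' ').toNat : Int)) ∧ (((xs.getD i ' ').toNat : Int)) ≤ 90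
    · simp only [List.foldl_cons, List.filterMap_cons, pvF, if_pos h]
      exact ih _
    · simp only [List.foldl_cons, List.filterMap_cons, pvF, if_neg h]
      exact ih _

lemma pvCounts_getD (xs : List Char) (klN kN jn : Nat) (hj : jn < 26) :
    ((PySem.List.enumerate xs 0).foldl (fun d p =>
        if 65 ≤ ((p.2.toNat : Int)) ∧ ((p.2.toNat : Int)) ≤ 90 then
          d.insert (PySem.Int.mod p.1 (klN : Int), (p.2.toNat : Int) - 65)
            (d.getD (PySem.Int.mod p.1 (klN : Int), (p.2.toNat : Int) - 65) 0 + 1)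
        else d) PySem.Dict.empty).getD ((kN : Int), (jn : Int)) 0
      = (pvColCnt xs klN kN (pvAlpha.getD jn 'A') : Int) := by
  rw [PySem.List.enumerate_eq_map_pyRange xs ' ',
      show PySem.List.len xs = ((xs.length : Nat) : Int) from rfl,
      PySem.List.pyRange_zero_natCast, List.map_map, List.foldl_map]
  rw [PySem.List.foldl_congr_mem _ _ (fun (d : PySem.Dict (Int × Int) Int) (i : Nat) =>
        if 65 ≤ (((xs.getD i ' ').toNat : Int)) ∧ (((xs.getD i ' ').toNat : Int)) ≤ 90 then
          d.insert (PySem.Int.mod (i : Int) (klN : Int), ((xs.getD i ' ').toNat : Int) - 65)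
            (d.getD (PySem.Int.mod (i : Int) (klN : Int), ((xs.getD i ' ').toNat : Int) - 65) 0 + 1)
        else d) _ ?hpt]
  case hpt =>
    intro d i _
    simp only [Function.comp_apply, PySem.List.pyGetD_of_nonneg xs ' ' (Int.natCast_nonneg i),
      Int.toNat_natCast]
  rw [pvFoldF, PySem.Dict.getD_foldl_insert_add_one, PySem.Dict.getD_empty,
      List.count_eq_countP, List.countP_filterMap]
  have hcp : (List.range xs.length).countP
        (fun i => ((pvF xs klN i).map (fun x => x == ((kN : Int), (jn : Int)))).getD false)
      = pvColCnt xs klN kN (pvAlpha.getD jn 'A') := by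
    apply List.countP_congr
    intro i _
    simp only [pvF]
    rw [PySem.Int.mod_natCast]
    have halpha := pvChar_eq_alpha (xs.getD i ' ') jn hj
    split_ifs with hP
    · simp only [Option.map_some, Option.getD_some, beq_iff_eq, Bool.and_eq_true,
        Prod.ext_iff]
      constructor
      · rintro ⟨hm, ho⟩
        exact ⟨halpha.mpr (by omega), by exact_mod_cast hm⟩
      · rintro ⟨hc, hm⟩
        have := halpha.mp hc
        exact ⟨by exact_mod_cast hm, by omega⟩
    · simp only [Option.map_none, Option.getD_none, Bool.false_eq_true, false_iff,
        Bool.and_eq_true, beq_iff_eq, not_and]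
      intro hc _
      apply hP
      have := halpha.mp hc
      constructor <;> omega
  rw [hcp]
  ring

-- ===== VERDICT (by name: the statement is the Claim_ definition above) =====
theorem clef_par_decalages_spec : Claim_equal_clef_par_decalages := by
  intro cipher kl _
  unfold Spec_clef_par_decalages clef_par_decalages clef_par_decalages_alt
  dsimp only
  by_cases hkl : kl ≤ 0
  · rw [if_pos hkl, pvPyRange_nil hkl]
    simp [Int.toNat_of_nonpos hkl]
  · rw [if_neg hkl]
    have hklpos : 0 < kl := by omega
    obtain ⟨klN, rfl⟩ : ∃ klN : Nat, kl = (klN : Int) := ⟨kl.toNat, (Int.toNat_of_nonneg hklpos.le).symm⟩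
    have h1 : 0 < klN := by exact_mod_cast hklpos
    rw [show PySem.Str.len cipher = ((cipher.toList.length : Nat) : Int) from rfl]
    have hA := pvFoldl_set (fun k => PySem.Int.mod (pvLettreFreqMax
        ((PySem.List.slice? cipher.toList (some k) (some ((cipher.toList.length : Nat) : Int))
          ((klN : Nat) : Int)).getD []) - 4) 26)
        klN 0 (List.replicate (((klN : Nat) : Int)).toNat 0) (by simp)
    simp only [Nat.cast_zero, List.take_zero, List.nil_append] at hA
    rw [hA, PySem.List.foldl_append_singleton_eq_map]
    simp only [List.nil_append]
    apply List.map_congr_left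
    intro k hk
    obtain ⟨hk0, hklt⟩ := PySem.List.mem_pyRange_one.mp hk
    obtain ⟨kN, rfl⟩ : ∃ kN : Nat, k = (kN : Int) := ⟨k.toNat, (Int.toNat_of_nonneg hk0).symm⟩
    have h2 : kN < klN := by exact_mod_cast hklt
    set col := (PySem.List.slice? cipher.toList (some ((kN : Nat) : Int))
        (some ((cipher.toList.length : Nat) : Int)) ((klN : Nat) : Int)).getD [] with hcol
    have hLlen : (((pvFreq col).length : Nat) : Int) = 26 := by
      rw [pvFreq_eq_map, List.length_map, pvAlpha_length]
      norm_num
    have hX : pvLettreFreqMax col = ((PySem.List.pyRange 0 26 1).foldl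
        (fun (s : Int × Int) e =>
          if PySem.List.pyGetD (pvFreq col) e 0 > s.1 then (PySem.List.pyGetD (pvFreq col) e 0, e) else s)
        (0, -1)).2 := by
      unfold pvLettreFreqMax
      dsimp only
      rw [hLlen]
    rw [hX]
    have hfold : ((PySem.List.pyRange 0 26 1).foldl
        (fun (s : Int × Int) e =>
          if PySem.List.pyGetD (pvFreq col) e 0 > s.1 then (PySem.List.pyGetD (pvFreq col) e 0, e) else s)
        (0, -1))
      = ((PySem.List.pyRange 0 26 1).foldl
        (fun (s : Int × Int) j =>
          if ((PySem.List.enumerate cipher.toList 0).foldl (fun d p =>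
              if 65 ≤ ((p.2.toNat : Int)) ∧ ((p.2.toNat : Int)) ≤ 90 then
                d.insert (PySem.Int.mod p.1 ((klN : Nat) : Int), (p.2.toNat : Int) - 65)
                  (d.getD (PySem.Int.mod p.1 ((klN : Nat) : Int), (p.2.toNat : Int) - 65) 0 + 1)
              else d) PySem.Dict.empty).getD (((kN : Nat) : Int), j) 0 > s.1 then
            (((PySem.List.enumerate cipher.toList 0).foldl (fun d p =>
              if 65 ≤ ((p.2.toNat : Int)) ∧ ((p.2.toNat : Int)) ≤ 90 then
                d.insert (PySem.Int.mod p.1 ((klN : Nat) : Int), (p.2.toNat : Int) - 65)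
                  (d.getD (PySem.Int.mod p.1 ((klN : Nat) : Int), (p.2.toNat : Int) - 65) 0 + 1)
              else d) PySem.Dict.empty).getD (((kN : Nat) : Int), j) 0, j)
          else s)
        (0, -1)) := by
      apply PySem.List.foldl_congr_mem
      intro s e he
      obtain ⟨he0, helt⟩ := PySem.List.mem_pyRange_one.mp he
      obtain ⟨jn, rfl⟩ : ∃ jn : Nat, e = (jn : Int) := ⟨e.toNat, (Int.toNat_of_nonneg he0).symm⟩
      have hj : jn < 26 := by exact_mod_cast helt
      have hread : PySem.List.pyGetD (pvFreq col) ((jn : Nat) : Int) 0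
          = ((PySem.List.enumerate cipher.toList 0).foldl (fun d p =>
              if 65 ≤ ((p.2.toNat : Int)) ∧ ((p.2.toNat : Int)) ≤ 90 then
                d.insert (PySem.Int.mod p.1 ((klN : Nat) : Int), (p.2.toNat : Int) - 65)
                  (d.getD (PySem.Int.mod p.1 ((klN : Nat) : Int), (p.2.toNat : Int) - 65) 0 + 1)
              else d) PySem.Dict.empty).getD (((kN : Nat) : Int), ((jn : Nat) : Int)) 0 := by
        rw [pvCounts_getD cipher.toList klN kN jn hj]
        rw [pvFreq_eq_map, PySem.List.pyGetD_of_nonneg _ _ (Int.natCast_nonneg jn),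
            Int.toNat_natCast]
        have hjl : jn < (pvAlpha.map (fun c => ((col.count c : Nat) : Int))).length := by
          rw [List.length_map, pvAlpha_length]
          exact hj
        rw [List.getD_eq_getElem _ _ hjl, List.getElem_map, hcol,
            pvSlice_count cipher.toList klN kN h1 h2,
            ← List.getD_eq_getElem pvAlpha 'A' (by rw [pvAlpha_length]; exact hj)]
      rw [hread]
    rw [hfold]
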